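-- pv_equiv track=rewrite | github.com/jjsong13/dataStructure | findMax2.py | getMax2
-- ===== SOURCE A (Python) =====
-- def getMax2(n, myMatrix):
--     # '''
--     # 크기 n x n 의 행렬 myMatrix내의 원소의 합, 최댓값, 두 번째 최댓값을 반환하는 함수.
--     #
--     # 만약 myMatrix = [[1, 2, 3], [2, 3, 4], [3, 3, 4]]라면 (25, 4, 3) 을 반환한다.
--     # '''
--
--     mySum = 0
--     myMax = 0
--     myMax2 = 0
--
--     for i in range(n):
--         for j in range(n):
--             mySum = mySum + myMatrix[i][j]
--
--             if myMax < myMatrix[i][j]: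
--                 myMax = myMatrix[i][j]
--
--     for k in range(n):
--         for l in range(n):
--
--             if myMatrix[k][l] == myMax :
--                 myMatrix[k][l] = 0
--
--     for m in range(n):
--         for o in range(n):
--
--             if myMax2 < myMatrix[m][o]:
--                 myMax2 = myMatrix[m][o]
--
--
--     return (mySum, myMax, myMax2)
-- ===== SOURCE B (Python) =====
-- def getMax2(n, myMatrix):
--     # One pass tracking sum and the two largest distinct values online
--     # (both floored at 0, like A's zero-initialised accumulators), then a
--     # single double loop reproducing A's in-place zeroing of entries == max.
--     mySum = 0
--     best = 0
--     second = 0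
--     for i in range(n):
--         for j in range(n):
--             v = myMatrix[i][j]
--             mySum += v
--             if best < v:
--                 second = best
--                 best = v
--             elif v < best and second < v:
--                 second = v
--     for i in range(n):
--         for j in range(n):
--             if myMatrix[i][j] == best:
--                 myMatrix[i][j] = 0
--     return (mySum, best, second)
-- ===== Notes on version B (the rewrite author's own statement) =====
-- stated objective: alternative
-- what changed: A's three double loops (scan for sum+max, zero out entries equal to the max in place, rescan the mutated matrix for the new max) are replaced by a single double loop that tracks the sum and the two largest distinct values online (floored at 0 like A's zero-initialised accumulators), followed by one mutation loop that reproduces A's in-place zeroing of the argument.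
import Mathlib
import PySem

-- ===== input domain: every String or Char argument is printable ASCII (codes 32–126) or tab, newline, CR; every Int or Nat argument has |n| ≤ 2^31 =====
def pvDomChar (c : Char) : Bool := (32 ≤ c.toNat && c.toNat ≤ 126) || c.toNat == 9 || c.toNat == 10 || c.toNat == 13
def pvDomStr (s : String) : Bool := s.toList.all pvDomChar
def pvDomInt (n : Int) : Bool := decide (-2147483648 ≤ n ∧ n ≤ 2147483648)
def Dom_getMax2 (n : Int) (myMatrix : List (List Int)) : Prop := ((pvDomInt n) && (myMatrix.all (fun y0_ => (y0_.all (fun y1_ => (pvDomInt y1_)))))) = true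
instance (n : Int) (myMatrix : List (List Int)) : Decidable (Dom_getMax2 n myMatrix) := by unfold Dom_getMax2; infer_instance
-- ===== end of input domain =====

-- B replaces A's scan / zero-the-max pass / rescan with ONE pass that tracks the
-- sum and the two largest distinct values online (alternative decomposition, same
-- O(n^2) cost).  Both Pythons mutate the argument identically (entries equal to
-- the max are zeroed); the equivalence proved here is about the RETURN value.

-- ===== PORT A =====
-- A: first double loop sums and takes the max; second double loop zeroes the
-- entries equal to the max (the matrix state is threaded through the fold);
-- third double loop rescans the mutated matrix for its max.
def getMax2 (n : Int) (myMatrix : List (List Int)) : Int × Int × Int :=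
  let r := PySem.List.pyRange 0 n 1
  let p := r.foldl (fun (s : Int × Int) i =>
    r.foldl (fun (s : Int × Int) j =>
      let v := PySem.List.pyGetD (PySem.List.pyGetD myMatrix i []) j 0
      (s.1 + v, if s.2 < v then v else s.2)) s) (0, 0)
  let mySum := p.1
  let myMax := p.2
  let mMut := r.foldl (fun mat k =>
    r.foldl (fun mat l =>
      if PySem.List.pyGetD (PySem.List.pyGetD mat k []) l 0 = myMax then
        PySem.List.pySetD mat k (PySem.List.pySetD (PySem.List.pyGetD mat k []) l (0 : Int))
      else mat) mat) myMatrix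
  let myMax2 := r.foldl (fun (a : Int) m =>
    r.foldl (fun (a : Int) o =>
      let v := PySem.List.pyGetD (PySem.List.pyGetD mMut m []) o 0
      if a < v then v else a) a) 0
  (mySum, myMax, myMax2)

-- ===== PORT B =====
-- B: one double loop over the same indices keeping (sum, best, second).
-- Source B's trailing mutation loop only changes the argument in place, never the
-- returned triple, so the pure port has no counterpart of it.
def getMax2_alt (n : Int) (myMatrix : List (List Int)) : Int × Int × Int :=
  let r := PySem.List.pyRange 0 n 1
  r.foldl (fun (st : Int × Int × Int) i =>
    r.foldl (fun (st : Int × Int × Int) j =>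
      let v := PySem.List.pyGetD (PySem.List.pyGetD myMatrix i []) j 0
      if st.2.1 < v then (st.1 + v, v, st.2.1)
      else if v < st.2.1 ∧ st.2.2 < v then (st.1 + v, st.2.1, v)
      else (st.1 + v, st.2.1, st.2.2)) st) (0, 0, 0)

-- ===== PRECONDITION & SPEC =====
-- Pre_ excludes exactly the inputs where the Python A raises IndexError:
-- fewer than n rows, or one of the first n rows shorter than n.
def Pre_getMax2 (n : Int) (myMatrix : List (List Int)) : Prop :=
  n ≤ (myMatrix.length : Int) ∧ ∀ row ∈ myMatrix.take n.toNat, n ≤ (row.length : Int)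
instance (n : Int) (myMatrix : List (List Int)) : Decidable (Pre_getMax2 n myMatrix) := by unfold Pre_getMax2; infer_instance
def pvWitness_getMax2 : Int × List (List Int) := (3, [[1, 2, 3], [2, 3, 4], [3, 3, 4]])

def Spec_getMax2 (n : Int) (myMatrix : List (List Int)) (out : Int × Int × Int) : Prop := out = getMax2_alt n myMatrix
instance (n : Int) (myMatrix : List (List Int)) (out : Int × Int × Int) : Decidable (Spec_getMax2 n myMatrix out) := by unfold Spec_getMax2; infer_instance

-- ===== CLAIM (what is proved, stated in full; the proofs are below) =====
def Claim_equal_getMax2 : Prop := ∀ (n : Int) (myMatrix : List (List Int)), Dom_getMax2 n myMatrix → Pre_getMax2 n myMatrix → Spec_getMax2 n myMatrix (getMax2 n myMatrix)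

-- ===== LEMMAS AND PROOFS =====

def pvRowZero (row : List Int) (N : Nat) (M : Int) : List Int :=
  (List.range N).foldl (fun r l => if r.getD l 0 = M then r.set l 0 else r) row

lemma pv_getD_set_ne {α : Type} (xs : List α) (k j : Nat) (v d : α) (h : k ≠ j) :
    (xs.set k v).getD j d = xs.getD j d := by
  simp [List.getD_eq_getElem?_getD, h]

lemma pv_getD_set_self {α : Type} (xs : List α) (k : Nat) (v d : α) (h : k < xs.length) :
    (xs.set k v).getD k d = v := by
  simp [List.getD_eq_getElem?_getD, h]
lemma pvRowZero_succ (row : List Int) (N : Nat) (M : Int) :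
    pvRowZero row (N + 1) M
      = (if (pvRowZero row N M).getD N 0 = M then (pvRowZero row N M).set N 0
         else pvRowZero row N M) := by
  simp [pvRowZero, List.range_succ, List.foldl_append]

lemma pvRowZero_length (row : List Int) (N : Nat) (M : Int) :
    (pvRowZero row N M).length = row.length := by
  induction N with
  | zero => simp [pvRowZero]
  | succ N ih => rw [pvRowZero_succ]; split <;> simp [ih]

lemma pvRowZero_getD (row : List Int) (N : Nat) (M : Int) (j : Nat) :
    (pvRowZero row N M).getD j 0
      = if j < N ∧ row.getD j 0 = M then 0 else row.getD j 0 := by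
  induction N generalizing j with
  | zero => simp [pvRowZero]
  | succ N ih =>
    have hN : (pvRowZero row N M).getD N 0 = row.getD N 0 := by
      rw [ih, if_neg (by omega : ¬(N < N ∧ row.getD N 0 = M))]
    rw [pvRowZero_succ, hN]
    by_cases hM : row.getD N 0 = M
    · rw [if_pos hM]
      by_cases hj : j = N
      · subst hj
        by_cases hlen : j < (pvRowZero row j M).length
        · rw [pv_getD_set_self _ _ _ _ hlen, if_pos ⟨by omega, hM⟩]
        · have hrl : row.length ≤ j := by
            rw [pvRowZero_length] at hlen; omega
          have h0 : row.getD j 0 = 0 := by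
            simp [List.getD_eq_getElem?_getD, List.getElem?_eq_none hrl]
          rw [List.set_eq_of_length_le (by omega), hN, h0,
            if_pos ⟨by omega, h0 ▸ hM⟩]
      · rw [pv_getD_set_ne _ _ _ _ _ (Ne.symm hj), ih]
        have : (j < N + 1) ↔ (j < N) := by omega
        simp [this]
    · rw [if_neg hM, ih]
      by_cases hj : j = N
      · subst hj
        rw [if_neg (by omega : ¬(j < j ∧ row.getD j 0 = M)),
          if_neg (fun h => hM h.2)]
      · have : (j < N + 1) ↔ (j < N) := by omega
        simp [this]
def pvVal (m : List (List Int)) (i j : Nat) : Int := (m.getD i []).getD j 0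

def pvMatZero (m : List (List Int)) (K N : Nat) (M : Int) : List (List Int) :=
  (List.range K).foldl (fun mat k =>
    (List.range N).foldl (fun mat l =>
      if (mat.getD k []).getD l 0 = M then mat.set k ((mat.getD k []).set l 0) else mat) mat) m

lemma pv_inner_eq_set (mat : List (List Int)) (k N : Nat) (M : Int) :
    (List.range N).foldl (fun mat l =>
        if (mat.getD k []).getD l 0 = M then mat.set k ((mat.getD k []).set l 0) else mat) mat
      = if k < mat.length then mat.set k (pvRowZero (mat.getD k []) N M) else mat := by
  induction N with
  | zero =>
    simp only [List.range_zero, List.foldl_nil, pvRowZero]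
    split
    · rw [List.getD_eq_getElem _ _ ‹_›, List.set_getElem_self]
    · rfl
  | succ N ih =>
    rw [List.range_succ, List.foldl_append, List.foldl_cons, List.foldl_nil, ih]
    by_cases hk : k < mat.length
    · rw [if_pos hk, if_pos hk]
      have hrow : ((mat.set k (pvRowZero (mat.getD k []) N M)).getD k [])
          = pvRowZero (mat.getD k []) N M := by
        rw [pv_getD_set_self _ _ _ _ hk]
      rw [hrow, pvRowZero_succ]
      by_cases hM : (pvRowZero (mat.getD k []) N M).getD N 0 = M
      · rw [if_pos hM, if_pos hM, List.set_set]
      · rw [if_neg hM, if_neg hM]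
    · rw [if_neg hk, if_neg hk]
      have hnil : mat.getD k [] = ([] : List Int) := by
        simp [List.getD_eq_getElem?_getD, List.getElem?_eq_none (by omega : mat.length ≤ k)]
      rw [hnil]
      split
      · rw [show ([] : List Int).set N 0 = [] from rfl,
          List.set_eq_of_length_le (by omega)]
      · rfl

lemma pvMatZero_succ (m : List (List Int)) (K N : Nat) (M : Int) :
    pvMatZero m (K + 1) N M
      = (if K < (pvMatZero m K N M).length
         then (pvMatZero m K N M).set K (pvRowZero ((pvMatZero m K N M).getD K []) N M)
         else pvMatZero m K N M) := by
  rw [pvMatZero, List.range_succ, List.foldl_append, List.foldl_cons, List.foldl_nil,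
    ← pvMatZero, pv_inner_eq_set]

lemma pvMatZero_length (m : List (List Int)) (K N : Nat) (M : Int) :
    (pvMatZero m K N M).length = m.length := by
  induction K with
  | zero => simp [pvMatZero]
  | succ K ih => rw [pvMatZero_succ]; split <;> simp [ih]

lemma pvMatZero_val (m : List (List Int)) (K N : Nat) (M : Int) (i j : Nat) :
    pvVal (pvMatZero m K N M) i j
      = if i < K ∧ j < N ∧ pvVal m i j = M then 0 else pvVal m i j := by
  induction K generalizing i with
  | zero => rw [pvMatZero, List.range_zero, List.foldl_nil, if_neg (by omega)]
  | succ K ih =>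
    rw [pvMatZero_succ]
    by_cases hk : K < (pvMatZero m K N M).length
    · rw [if_pos hk]
      by_cases hi : i = K
      · subst hi
        have hset : pvVal ((pvMatZero m i N M).set i (pvRowZero ((pvMatZero m i N M).getD i []) N M)) i j
            = (pvRowZero ((pvMatZero m i N M).getD i []) N M).getD j 0 := by
          rw [pvVal, pv_getD_set_self _ _ _ _ hk]
        rw [hset, pvRowZero_getD]
        have hW : ((pvMatZero m i N M).getD i []).getD j 0 = pvVal m i j := by
          have h := ih i
          rw [if_neg (by omega)] at h
          exact h
        rw [hW]
        by_cases hc : j < N ∧ pvVal m i j = M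
        · rw [if_pos hc, if_pos ⟨by omega, hc⟩]
        · rw [if_neg hc, if_neg (fun h => hc h.2)]
      · have : pvVal ((pvMatZero m K N M).set K (pvRowZero ((pvMatZero m K N M).getD K []) N M)) i j
            = pvVal (pvMatZero m K N M) i j := by
          rw [pvVal, pv_getD_set_ne _ _ _ _ _ (Ne.symm hi), pvVal]
        rw [this, ih]
        have : (i < K + 1 ∧ j < N ∧ pvVal m i j = M) ↔ (i < K ∧ j < N ∧ pvVal m i j = M) := by
          constructor
          · rintro ⟨h1, h2⟩; exact ⟨by omega, h2⟩
          · rintro ⟨h1, h2⟩; exact ⟨by omega, h2⟩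
        rw [if_congr this rfl rfl]
    · rw [if_neg hk, ih]
      have hlen : m.length ≤ K := by rw [pvMatZero_length] at hk; omega
      by_cases hi : i = K
      · subst hi
        have h0 : pvVal m i j = 0 := by
          have hrow : m.getD i [] = [] := by
            simp [List.getD_eq_getElem?_getD, List.getElem?_eq_none hlen]
          rw [pvVal, hrow]
          rfl
        rw [if_neg (by omega), h0]
        split <;> rfl
      · have : (i < K + 1 ∧ j < N ∧ pvVal m i j = M) ↔ (i < K ∧ j < N ∧ pvVal m i j = M) := by
          constructor
          · rintro ⟨h1, h2⟩; exact ⟨by omega, h2⟩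
          · rintro ⟨h1, h2⟩; exact ⟨by omega, h2⟩
        rw [if_congr this rfl rfl]
lemma pv_foldl_max_congr (L : List Int) (x y : Int) (h : x = y) :
    L.foldl max x = L.foldl max y := by rw [h]

lemma pv_top2 (vals : List Int) : ∀ (sum b s : Int), 0 ≤ s → s ≤ b →
    vals.foldl (fun (st : Int × Int × Int) v =>
        if st.2.1 < v then (st.1 + v, v, st.2.1)
        else if v < st.2.1 ∧ st.2.2 < v then (st.1 + v, st.2.1, v)
        else (st.1 + v, st.2.1, st.2.2)) (sum, b, s)
      = (sum + vals.sum,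
         vals.foldl max b,
         ((b :: vals).map (fun v => if v = vals.foldl max b then 0 else v)).foldl max s) := by
  induction vals with
  | nil =>
    intro sum b s h0 hsb
    simp [max_eq_left h0]
  | cons v rest ih =>
    intro sum b s h0 hsb
    simp only [List.foldl_cons, List.sum_cons, List.map_cons]
    by_cases hb : b < v
    · have hmax : max b v = v := max_eq_right hb.le
      have hM := PySem.List.le_foldl_max rest v
      have hbM : b ≠ rest.foldl max v := by have := hM.1; omega
      rw [if_pos hb, ih (sum + v) v b (le_trans h0 hsb) hb.le]
      simp only [List.foldl_cons, List.map_cons, hmax, Prod.mk.injEq]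
      refine ⟨by ring, trivial, ?_⟩
      rw [if_neg hbM]
      apply pv_foldl_max_congr
      by_cases hveq : v = rest.foldl max v
      · rw [if_pos hveq]; omega
      · rw [if_neg hveq]; omega
    · have hmax : max b v = b := max_eq_left (by omega)
      have hM := PySem.List.le_foldl_max rest b
      have hvM : v ≤ rest.foldl max b := by have := hM.1; omega
      by_cases h2 : v < b ∧ s < v
      · have hvne : v ≠ rest.foldl max b := by omega
        rw [if_neg hb, if_pos h2, ih (sum + v) b v (by omega) (by omega)]
        simp only [List.foldl_cons, List.map_cons, hmax, Prod.mk.injEq]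
        refine ⟨by ring, trivial, ?_⟩
        rw [if_neg hvne]
        apply pv_foldl_max_congr
        by_cases hbeq : b = rest.foldl max b
        · rw [if_pos hbeq]; omega
        · rw [if_neg hbeq]; omega
      · rw [if_neg hb, if_neg h2, ih (sum + v) b s h0 hsb]
        simp only [List.foldl_cons, List.map_cons, hmax, Prod.mk.injEq]
        refine ⟨by ring, trivial, ?_⟩
        apply pv_foldl_max_congr
        by_cases hveq : v = rest.foldl max b
        · rw [if_pos hveq]
          by_cases hbeq : b = rest.foldl max b
          · rw [if_pos hbeq]; omega
          · rw [if_neg hbeq]; omega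
        · rw [if_neg hveq]
          by_cases hbeq : b = rest.foldl max b
          · rw [if_pos hbeq]; omega
          · rw [if_neg hbeq]; omega
def pvVals (m : List (List Int)) (N : Nat) : List Int :=
  (List.range N).flatMap (fun i => (List.range N).map (fun j => pvVal m i j))

lemma pvVal_def (m : List (List Int)) (i j : Nat) :
    (m.getD i []).getD j 0 = pvVal m i j := rfl

lemma pv_foldl_nested {α : Type} (g : α → Int → α) (I J : List Nat) (f : Nat → Nat → Int) (init : α) :
    I.foldl (fun a i => J.foldl (fun a j => g a (f i j)) a) init
      = (I.flatMap (fun i => J.map (f i))).foldl g init := by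
  induction I generalizing init with
  | nil => rfl
  | cons i I ih => simp [List.foldl_append, List.foldl_map, ih]

lemma portB_char (n : Int) (m : List (List Int)) :
    getMax2_alt n m =
      ((pvVals m n.toNat).sum,
       (pvVals m n.toNat).foldl max 0,
       (pvVals m n.toNat).foldl
          (fun a v => max a (if v = (pvVals m n.toNat).foldl max 0 then 0 else v)) 0) := by
  simp only [getMax2_alt, PySem.List.pyRange_one, Int.sub_zero, List.foldl_map, zero_add,
    PySem.List.pyGetD_natCast, pvVal_def]
  rw [pv_foldl_nested (fun (st : Int × Int × Int) v =>
        if st.2.1 < v then (st.1 + v, v, st.2.1)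
        else if v < st.2.1 ∧ st.2.2 < v then (st.1 + v, st.2.1, v)
        else (st.1 + v, st.2.1, st.2.2)) (List.range n.toNat) (List.range n.toNat)
        (pvVal m) (0, 0, 0)]
  rw [pv_top2 _ 0 0 0 le_rfl le_rfl]
  simp only [zero_add, List.map_cons, List.foldl_cons, ite_self, max_self, List.foldl_map]
  rfl
lemma pv_if_lt_eq_max (a v : Int) : (if a < v then v else a) = max a v := by
  rcases le_or_gt v a with h | h
  · simp [max_eq_left h, not_lt.mpr h]
  · simp [max_eq_right h.le, h]

lemma pv_mut_read (m : List (List Int)) (N : Nat) (M : Int) (i o : Nat)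
    (hi : i < N) (ho : o < N) :
    pvVal ((List.range N).foldl (fun mat k => (List.range N).foldl (fun mat l =>
        if pvVal mat k l = M then mat.set k ((mat.getD k []).set l 0) else mat) mat) m) i o
      = if pvVal m i o = M then 0 else pvVal m i o := by
  have h : ((List.range N).foldl (fun mat k => (List.range N).foldl (fun mat l =>
        if pvVal mat k l = M then mat.set k ((mat.getD k []).set l 0) else mat) mat) m)
      = pvMatZero m N N M := rfl
  rw [h, pvMatZero_val]
  by_cases hc : pvVal m i o = M
  · rw [if_pos ⟨hi, ho, hc⟩, if_pos hc]
  · rw [if_neg (fun hx => hc hx.2.2), if_neg hc]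

lemma pv_flatMap_z (m : List (List Int)) (N : Nat) (M : Int) :
    (List.range N).flatMap (fun i => (List.range N).map
        (fun o => if pvVal m i o = M then 0 else pvVal m i o))
      = (pvVals m N).map (fun v => if v = M then 0 else v) := by
  simp [pvVals, List.map_flatMap, List.map_map, Function.comp_def]

lemma pv_read_loop (W m : List (List Int)) (N : Nat) (M : Int)
    (h : ∀ i o, i < N → o < N → pvVal W i o = if pvVal m i o = M then 0 else pvVal m i o) :
    (List.range N).foldl (fun (a : Int) i =>
        (List.range N).foldl (fun (a : Int) o => max a (pvVal W i o)) a) 0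
      = (pvVals m N).foldl (fun a v => max a (if v = M then 0 else v)) 0 := by
  have step1 : (List.range N).foldl (fun (a : Int) i =>
        (List.range N).foldl (fun (a : Int) o => max a (pvVal W i o)) a) 0
      = (List.range N).foldl (fun (a : Int) i =>
        (List.range N).foldl (fun (a : Int) o =>
          max a (if pvVal m i o = M then 0 else pvVal m i o)) a) 0 := by
    apply PySem.List.foldl_congr_mem
    intro acc i hi
    apply PySem.List.foldl_congr_mem
    intro a o ho
    rw [h i o (List.mem_range.mp hi) (List.mem_range.mp ho)]
  rw [step1,
    pv_foldl_nested max (List.range N) (List.range N)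
      (fun i o => if pvVal m i o = M then 0 else pvVal m i o) 0,
    pv_flatMap_z, List.foldl_map]

lemma portA_char (n : Int) (m : List (List Int)) :
    getMax2 n m =
      ((pvVals m n.toNat).sum,
       (pvVals m n.toNat).foldl max 0,
       (pvVals m n.toNat).foldl
          (fun a v => max a (if v = (pvVals m n.toNat).foldl max 0 then 0 else v)) 0) := by
  simp only [getMax2, PySem.List.pyRange_one, Int.sub_zero, List.foldl_map, zero_add,
    PySem.List.pyGetD_natCast, PySem.List.pySetD_natCast, pvVal_def, pv_if_lt_eq_max]
  rw [pv_foldl_nested (fun (s : Int × Int) v => (s.1 + v, max s.2 v))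
      (List.range n.toNat) (List.range n.toNat) (pvVal m) (0, 0)]
  rw [PySem.List.foldl_prod_mk (fun (a : Int) v => a + v) (fun (a : Int) v => max a v) _ 0 0]
  simp only [Prod.mk.injEq]
  refine ⟨(List.sum_eq_foldl).symm, rfl, ?_⟩
  exact pv_read_loop _ m n.toNat _ (fun i o hi ho => pv_mut_read m n.toNat _ i o hi ho)

-- ===== VERDICT (by name: the statement is the Claim_ definition above) =====
theorem getMax2_spec : Claim_equal_getMax2 := by
  intro n myMatrix _ _
  unfold Spec_getMax2
  rw [portA_char, portB_char]
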